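-- pv_equiv track=rewrite | github.com/mihaozbot/tex2svg | tex2svg.py | _strip_comments_by_line
-- ===== SOURCE A (Python) =====
-- def _strip_comments_by_line(text: str) -> str:
--     """Remove unescaped % and the rest of the line.
--     - Treat % as escaped when preceded by an odd number of backslashes.
--     - If the line is only a comment (or whitespace + comment), remove the whole line
--       (no blank line left).
--     - If there's code before %, keep that code and preserve the newline.
--     """
--     out_lines = []
--     for line in text.splitlines(keepends=True):
--         i = 0
--         removed = False
--         while True:
--             p = line.find('%', i)
--             if p == -1:
--                 break
--             # count consecutive backslashes immediately before p
--             j = p - 1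
--             bs = 0
--             while j >= 0 and line[j] == '\\':
--                 bs += 1
--                 j -= 1
--             if bs % 2 == 0:
--                 # unescaped % -> decide whether line is comment-only
--                 prefix = line[:p]
--                 # if prefix contains only whitespace, drop the whole line
--                 if prefix.strip() == '':
--                     # drop the entire line (no newline), i.e. remove the blank line
--                     line = ''
--                 else:
--                     # keep code before %, strip trailing whitespace, preserve newline
--                     newline = '\n' if line.endswith('\n') else ''
--                     line = prefix.rstrip() + newline
--                 removed = True
--                 break
--             else:
--                 # escaped %, continue search after this %
--                 i = p + 1
--         # If there was no % at all and the line is just whitespace and you want to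
--         # remove blank lines globally, you can optionally strip it here.
--         out_lines.append(line)
--     return ''.join(out_lines)
-- ===== SOURCE B (Python) =====
-- def _strip_comments_by_line(text: str) -> str:
--     """Remove unescaped % and the rest of the line (single forward scan per line)."""
--     out_lines = []
--     for line in text.splitlines(keepends=True):
--         bs = 0          # length of the current run of consecutive backslashes
--         cut = None      # index of the first unescaped '%', if any
--         for k, ch in enumerate(line):
--             if ch == '\\':
--                 bs += 1
--             elif ch == '%' and bs % 2 == 0:
--                 cut = k
--                 break
--             else:
--                 bs = 0
--         if cut is not None:
--             prefix = line[:cut]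
--             if prefix.strip() == '':
--                 line = ''
--             else:
--                 line = prefix.rstrip() + ('\n' if line.endswith('\n') else '')
--         out_lines.append(line)
--     return ''.join(out_lines)
-- ===== Notes on version B (the rewrite author's own statement) =====
-- stated objective: alternative
-- what changed: The per-line find-the-next-percent + backward backslash-count + retry loop is replaced by a single forward scan per line that tracks the running backslash-run parity and stops at the first unescaped percent sign; the line splitting and prefix handling are unchanged.
import Mathlib
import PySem

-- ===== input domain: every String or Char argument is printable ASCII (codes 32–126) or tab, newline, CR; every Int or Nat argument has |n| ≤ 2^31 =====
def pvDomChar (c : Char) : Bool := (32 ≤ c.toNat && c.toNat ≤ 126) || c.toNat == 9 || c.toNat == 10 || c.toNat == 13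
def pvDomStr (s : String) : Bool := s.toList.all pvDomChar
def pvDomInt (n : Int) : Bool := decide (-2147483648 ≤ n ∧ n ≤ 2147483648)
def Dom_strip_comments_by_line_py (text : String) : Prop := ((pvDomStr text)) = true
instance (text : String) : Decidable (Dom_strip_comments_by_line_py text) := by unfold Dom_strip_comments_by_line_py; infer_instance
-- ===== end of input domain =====

-- B replaces A's find-%-then-count-backslashes-backwards-and-retry inner loop by a single
-- forward scan per line tracking the backslash-run parity (alternative decomposition, same cost).

-- shared helper: text.splitlines(keepends=True), which both Pythons call.
-- Hand-ported: exact on inputs whose only line-break characters are '\n', '\r', '\r\n'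
-- (the domain Dom_ admits only tab/'\n'/'\r'/printable ASCII, so this is exact there).
-- (fuel : a totality device only; callers pass fuel = cs.length, enough for the whole input)
def pySplitKeep (acc : List Char) (cs : List Char) (fuel : Nat) : List (List Char) :=
  match fuel, cs with
  | _, [] => if acc.isEmpty then [] else [acc.reverse]
  | 0, _ => []
  | fuel + 1, '\r' :: '\n' :: rest => (acc.reverse ++ ['\r', '\n']) :: pySplitKeep [] rest fuel
  | fuel + 1, '\n' :: rest => (acc.reverse ++ ['\n']) :: pySplitKeep [] rest fuel
  | fuel + 1, '\r' :: rest => (acc.reverse ++ ['\r']) :: pySplitKeep [] rest fuel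
  | fuel + 1, c :: rest => pySplitKeep (c :: acc) rest fuel

-- ===== PORT A =====
-- inner 'while j >= 0 and line[j] == '\\': bs += 1; j -= 1'
-- (fuel : a totality device; ≥ the number of iterations the Python loop makes)
def bsCountA (line : List Char) (j : Int) (bs : Nat) (fuel : Nat) : Nat :=
  match fuel with
  | 0 => bs
  | fuel + 1 =>
    if 0 ≤ j ∧ PySem.List.pyGet? line j = some '\\' then bsCountA line (j - 1) (bs + 1) fuel
    else bs

-- outer 'while True' of A: p = line.find('%', i); stop at -1, or at an even backslash
-- count; else retry from p+1.  Returns the cut position (None = the loop broke at p == -1).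
-- (fuel : a totality device; callers pass line.length + 1, enough since i strictly grows)
def findUnescA (line : List Char) (i : Nat) (fuel : Nat) : Option Nat :=
  match fuel with
  | 0 => none
  | fuel + 1 =>
    let p := PySem.Chars.findFrom line ['%'] (i : Int) none
    if p = -1 then none
    else
      let bs := bsCountA line (p - 1) 0 p.toNat
      if bs % 2 = 0 then some p.toNat
      else findUnescA line (p.toNat + 1) fuel

-- body of A's 'for line in …' (the assignments to 'line' after the break)
def stripLineA (line : List Char) : List Char :=
  match findUnescA line 0 (line.length + 1) with
  | none => line
  | some p =>
    let pre := PySem.List.slice line none (some (p : Int))   -- line[:p]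
    if PySem.Chars.strip pre = [] then []
    else PySem.Chars.rstrip pre ++
      (if PySem.Chars.endswith line ['\n'] then ['\n'] else [])

def strip_comments_by_line_py (text : String) : String :=
  String.ofList (PySem.Chars.join [] ((pySplitKeep [] text.toList text.toList.length).map stripLineA))

-- ===== PORT B =====
-- B's single forward scan: bs = current backslash-run length, k = current index.
def scanB (cs : List Char) (k : Nat) (bs : Nat) : Option Nat :=
  match cs with
  | [] => none
  | c :: rest =>
    if c = '\\' then scanB rest (k + 1) (bs + 1)
    else if c = '%' ∧ bs % 2 = 0 then some k
    else scanB rest (k + 1) 0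

def stripLineB (line : List Char) : List Char :=
  match scanB line 0 0 with
  | none => line
  | some k =>
    let pre := PySem.List.slice line none (some (k : Int))   -- line[:cut]
    if PySem.Chars.strip pre = [] then []
    else PySem.Chars.rstrip pre ++
      (if PySem.Chars.endswith line ['\n'] then ['\n'] else [])

def strip_comments_by_line_py_alt (text : String) : String :=
  String.ofList (PySem.Chars.join [] ((pySplitKeep [] text.toList text.toList.length).map stripLineB))

-- ===== PRECONDITION & SPEC =====
def Spec_strip_comments_by_line_py (text : String) (out : String) : Prop := out = strip_comments_by_line_py_alt text
instance (text : String) (out : String) : Decidable (Spec_strip_comments_by_line_py text out) := by unfold Spec_strip_comments_by_line_py; infer_instance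

-- ===== CLAIM (what is proved, stated in full; the proofs are below) =====
def Claim_equal_strip_comments_by_line_py : Prop := ∀ (text : String), Dom_strip_comments_by_line_py text → Spec_strip_comments_by_line_py text (strip_comments_by_line_py text)

-- ===== LEMMAS AND PROOFS =====

-- length of the maximal backslash run immediately before position k
def runBs (s : List Char) (k : Nat) : Nat :=
  ((s.take k).reverse.takeWhile (fun c => c == '\\')).length

-- position p is an unescaped '%'
def okAt (s : List Char) (p : Nat) : Bool :=
  (s[p]? == some '%') && (runBs s p % 2 == 0)

-- the first unescaped '%' at or after i
def firstOk (s : List Char) (i : Nat) : Option Nat :=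
  (List.range' i (s.length - i)).find? (okAt s)

theorem prefix_singleton_iff (l : List Char) (a : Char) : ([a] <+: l) ↔ l[0]? = some a := by
  cases l with
  | nil => simp
  | cons b t => simp [List.cons_prefix_cons, eq_comm]

theorem runBs_succ (s : List Char) (k : Nat) (c : Char) (hc : s[k]? = some c) :
    runBs s (k + 1) = if c = '\\' then runBs s k + 1 else 0 := by
  unfold runBs
  rw [List.take_add_one, hc]
  by_cases h : c = '\\' <;> simp [h]

theorem bsCountA_eq (s : List Char) (p bs : Nat) (hp : p ≤ s.length) :
    bsCountA s ((p : Int) - 1) bs p = runBs s p + bs := by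
  induction p generalizing bs with
  | zero =>
    rw [bsCountA]
    simp [runBs]
  | succ n ih =>
    have hn : n < s.length := by omega
    obtain ⟨c, hc⟩ : ∃ c, s[n]? = some c := ⟨s[n], List.getElem?_eq_getElem hn⟩
    rw [bsCountA]
    have hj : ((n + 1 : Nat) : Int) - 1 = (n : Int) := by omega
    rw [hj]
    have hget : PySem.List.pyGet? s (n : Int) = s[n]? := by
      simp [PySem.List.pyGet?_natCast]
    by_cases hbs : c = '\\'
    · rw [if_pos (⟨by positivity, by rw [hget, hc, hbs]⟩ : 0 ≤ ((n:Nat):Int) ∧ PySem.List.pyGet? s ((n:Nat):Int) = some '\\')]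
      have : (n : Int) - 1 = ((n : Nat) : Int) - 1 := by omega
      rw [this, ih (bs + 1) (by omega), runBs_succ s n c hc, if_pos hbs]
      omega
    · rw [if_neg (by rw [hget, hc]; simp [hbs]), runBs_succ s n c hc, if_neg hbs]
      simp

theorem scanB_go (s : List Char) (cs : List Char) : ∀ (k bs : Nat), s.drop k = cs → bs = runBs s k → scanB cs k bs = firstOk s k := by
  induction cs with
  | nil =>
    intro k bs hd _
    have hlen : s.length ≤ k := List.drop_eq_nil_iff.mp hd
    simp [scanB, firstOk, Nat.sub_eq_zero_of_le hlen]
  | cons c rest ih =>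
    intro k bs hd hbs
    have hck : s[k]? = some c := by
      have h0 : (s.drop k)[0]? = s[k + 0]? := List.getElem?_drop
      rw [hd] at h0
      simpa using h0.symm
    have hrest : s.drop (k + 1) = rest := by
      have h1 : s.drop (k + 1) = (s.drop k).drop 1 := by rw [List.drop_drop]
      rw [h1, hd, List.drop_one, List.tail_cons]
    have hk : k < s.length := (List.getElem?_eq_some_iff.mp hck).1
    have hrange : List.range' k (s.length - k) = k :: List.range' (k + 1) (s.length - (k + 1)) := by
      have h2 : s.length - k = (s.length - (k + 1)) + 1 := by omega
      rw [h2, List.range'_succ]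
    rw [scanB]
    unfold firstOk
    rw [hrange]
    by_cases h1 : c = '\\'
    · rw [if_pos h1]
      have hok : okAt s k = false := by simp [okAt, hck, h1]
      rw [List.find?_cons_of_neg (by simp [hok])]
      exact ih (k + 1) (bs + 1) hrest (by rw [runBs_succ s k c hck, if_pos h1, hbs])
    · rw [if_neg h1]
      by_cases h2 : c = '%' ∧ bs % 2 = 0
      · rw [if_pos h2]
        have hok : okAt s k = true := by
          simp [okAt, hck, h2.1]
          omega
        rw [List.find?_cons_of_pos hok]
      · rw [if_neg h2]
        have hok : okAt s k = false := by
          by_cases hc : c = '%'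
          · have hodd : ¬ bs % 2 = 0 := fun h => h2 ⟨hc, h⟩
            simp [okAt, hck, hc]
            omega
          · simp [okAt, hck, hc]
        rw [List.find?_cons_of_neg (by simp [hok])]
        exact ih (k + 1) 0 hrest (by rw [runBs_succ s k c hck, if_neg h1])

theorem scanB_eq (s : List Char) (k bs : Nat) (hbs : bs = runBs s k) :
    scanB (s.drop k) k bs = firstOk s k :=
  scanB_go s (s.drop k) k bs rfl hbs

theorem okAt_false_of_no_percent (s : List Char) (q : Nat) (h : s[q]? ≠ some '%') :
    okAt s q = false := by
  simp only [okAt, Bool.and_eq_false_iff]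
  left
  simpa using h

theorem percent_at_of_prefix (s : List Char) (q : Nat) (h : ['%'] <+: s.drop q) :
    s[q]? = some '%' := by
  have h0 : (s.drop q)[0]? = some '%' := (prefix_singleton_iff _ _).mp h
  have h1 : (s.drop q)[0]? = s[q + 0]? := List.getElem?_drop
  rw [h1] at h0
  simpa using h0

theorem prefix_of_percent_at (s : List Char) (q : Nat) (h : s[q]? = some '%') :
    ['%'] <+: s.drop q := by
  apply (prefix_singleton_iff _ _).mpr
  have h1 : (s.drop q)[0]? = s[q + 0]? := List.getElem?_drop
  rw [h1]
  simpa using h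

theorem firstOk_split (s : List Char) (i m : Nat) (him : i ≤ m) (hm : m ≤ s.length)
    (hfalse : ∀ q, i ≤ q → q < m → okAt s q = false) :
    firstOk s i = firstOk s m := by
  unfold firstOk
  have hsplit : List.range' i (s.length - i) = List.range' i (m - i) ++ List.range' m (s.length - m) := by
    have h := List.range'_append_1 (s := i) (m := m - i) (n := s.length - m)
    rw [show i + (m - i) = m by omega] at h
    rw [show (m - i) + (s.length - m) = s.length - i by omega] at h
    exact h.symm
  rw [hsplit, List.find?_append]
  have hnone : (List.range' i (m - i)).find? (okAt s) = none := by
    apply List.find?_eq_none.mpr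
    intro q hq
    have hq' := List.mem_range'_1.mp hq
    simp [hfalse q hq'.1 (by omega)]
  rw [hnone, Option.none_or]

theorem findUnescA_eq (s : List Char) (i fuel : Nat) (hi : i ≤ s.length)
    (hf : s.length + 1 - i ≤ fuel) :
    findUnescA s i fuel = firstOk s i := by
  induction fuel generalizing i with
  | zero => omega
  | succ f ih =>
    rw [findUnescA]
    by_cases hp : PySem.Chars.findFrom s ['%'] (i : Int) none = -1
    · rw [if_pos hp]
      have hno : ¬ ['%'] <:+: s.drop i := (PySem.Chars.findFrom_natCast_eq_neg_one_iff s ['%'] i hi).mp hp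
      symm
      apply List.find?_eq_none.mpr
      intro q hq
      have hq' := List.mem_range'_1.mp hq
      rw [Bool.not_eq_true]
      apply okAt_false_of_no_percent
      intro hpc
      apply hno
      have hpre : ['%'] <+: s.drop q := prefix_of_percent_at s q hpc
      have hdd : s.drop q = (s.drop i).drop (q - i) := by
        rw [List.drop_drop]
        congr 1
        omega
      rw [hdd] at hpre
      exact hpre.isInfix.trans (List.drop_suffix _ _).isInfix
    · rw [if_neg hp]
      obtain ⟨h1, h2, h3⟩ := PySem.Chars.findFrom_natCast_spec s ['%'] i hi hp
      set p := PySem.Chars.findFrom s ['%'] (i : Int) none with hpdef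
      have hp0 : 0 ≤ p := le_trans (by positivity) h1
      have hip : i ≤ p.toNat := by omega
      have hpc : s[p.toNat]? = some '%' := percent_at_of_prefix s p.toNat h2
      have hplen : p.toNat < s.length := (List.getElem?_eq_some_iff.mp hpc).1
      have hbs : bsCountA s (p - 1) 0 p.toNat = runBs s p.toNat := by
        rw [show p - 1 = ((p.toNat : Nat) : Int) - 1 by omega,
          bsCountA_eq s p.toNat 0 (by omega)]
        omega
      by_cases heven : bsCountA s (p - 1) 0 p.toNat % 2 = 0
      · rw [if_pos heven]
        have heven' : runBs s p.toNat % 2 = 0 := by rw [← hbs]; exact heven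
        rw [firstOk_split s i p.toNat hip (by omega)
          (fun q hq1 hq2 => okAt_false_of_no_percent s q
            (fun hc => h3 q hq1 hq2 (prefix_of_percent_at s q hc)))]
        unfold firstOk
        rw [show s.length - p.toNat = (s.length - (p.toNat + 1)) + 1 by omega, List.range'_succ]
        rw [List.find?_cons_of_pos (by simp [okAt, hpc, heven'])]
      · rw [if_neg heven]
        have hodd' : ¬ runBs s p.toNat % 2 = 0 := by rw [← hbs]; exact heven
        rw [ih (p.toNat + 1) (by omega) (by omega)]
        symm
        apply firstOk_split s i (p.toNat + 1) (by omega) (by omega)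
        intro q hq1 hq2
        by_cases hqp : q = p.toNat
        · subst hqp
          simp [okAt, hpc, hodd']
        · exact okAt_false_of_no_percent s q (fun hc => h3 q hq1 (by omega) (prefix_of_percent_at s q hc))

theorem stripLine_eq (s : List Char) : stripLineA s = stripLineB s := by
  have h : findUnescA s 0 (s.length + 1) = scanB s 0 0 := by
    rw [findUnescA_eq s 0 (s.length + 1) (Nat.zero_le _) (by omega)]
    rw [← scanB_eq s 0 0 (by simp [runBs])]
    simp
  unfold stripLineA stripLineB
  rw [h]

-- ===== VERDICT (by name: the statement is the Claim_ definition above) =====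
theorem strip_comments_by_line_py_spec : Claim_equal_strip_comments_by_line_py := by
  intro text _
  unfold Spec_strip_comments_by_line_py strip_comments_by_line_py strip_comments_by_line_py_alt
  congr 2
  exact List.map_congr_left (fun l _ => stripLine_eq l)
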